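-- pv_equiv track=rewrite | github.com/ZekaiGalaxy/LearnRepr | src/prompt.py | edit_element
-- ===== SOURCE A (Python) =====
-- def edit_element(patterns, fp_samples, most_similar_pattern):
--     prompts = []
--     count = {}
--     for pid, pattern in enumerate(patterns):
--         count[pid] = 0
--         prompts.append(pattern + '\nWrong samples:')
--
--     for sid, sample in enumerate(fp_samples):
--         false_pattern = most_similar_pattern[sid][0]
--         if count[false_pattern] < 6:
--             prompts[false_pattern] += ' ' + sample
--             count[false_pattern] += 1
--     return prompts
-- ===== SOURCE B (Python) =====
-- def edit_element(patterns, fp_samples, most_similar_pattern):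
--     # Build the full (uncapped) inverted index pattern id -> all its samples,
--     # then truncate to 6 and render each prompt at the end.
--     occ = {pid: [] for pid in range(len(patterns))}
--     for sid, sample in enumerate(fp_samples):
--         occ[most_similar_pattern[sid][0]].append(sample)
--     return [patterns[pid] + '\nWrong samples:' + ''.join(' ' + s for s in occ[pid][:6])
--             for pid in range(len(patterns))]
-- ===== Notes on version B (the rewrite author's own statement) =====
-- stated objective: simpler
-- what changed: B replaces A's capped single pass (counter dict, conditional append, in-place string mutation through an index) by an unconditional inverted-index build (pattern id -> all its samples, no cap and no branch in the loop) followed by a separate render step that truncates each index list to 6 and joins it onto the pattern.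
import Mathlib
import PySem

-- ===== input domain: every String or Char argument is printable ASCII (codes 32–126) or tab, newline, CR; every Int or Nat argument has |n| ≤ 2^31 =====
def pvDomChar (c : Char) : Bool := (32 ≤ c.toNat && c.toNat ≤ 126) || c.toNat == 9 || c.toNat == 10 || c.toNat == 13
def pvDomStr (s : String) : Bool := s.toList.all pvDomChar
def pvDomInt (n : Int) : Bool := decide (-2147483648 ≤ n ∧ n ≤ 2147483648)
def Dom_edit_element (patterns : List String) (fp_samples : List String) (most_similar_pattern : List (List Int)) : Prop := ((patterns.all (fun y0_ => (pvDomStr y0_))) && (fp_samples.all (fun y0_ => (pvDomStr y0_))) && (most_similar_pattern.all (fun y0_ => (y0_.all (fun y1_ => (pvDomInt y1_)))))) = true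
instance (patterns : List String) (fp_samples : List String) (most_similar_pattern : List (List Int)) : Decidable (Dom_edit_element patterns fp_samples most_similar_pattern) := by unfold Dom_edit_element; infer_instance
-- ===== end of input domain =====

-- B builds the full uncapped inverted index (pattern id -> all its samples) in one unconditional
-- pass and then renders each prompt separately, truncating to 6 at render time — instead of A's
-- capped pass with a counter dict, a branch, and in-place string mutation through an index.

-- ===== PORT A =====
def edit_element (patterns : List String) (fp_samples : List String) (most_similar_pattern : List (List Int)) : List String :=
  -- first loop: count[pid] = 0; prompts.append(pattern + '\nWrong samples:')
  let init := (PySem.List.enumerate patterns).foldl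
    (fun (st : PySem.Dict Int Int × List String) pr =>
      (st.1.insert pr.1 0, st.2 ++ [pr.2 ++ "\nWrong samples:"]))
    (PySem.Dict.empty, [])
  -- second loop over enumerate(fp_samples); indexing is total via pyGetD, exact under Pre_
  let fin := (PySem.List.enumerate fp_samples).foldl
    (fun (st : List String × PySem.Dict Int Int) pr =>
      let fp := PySem.List.pyGetD (PySem.List.pyGetD most_similar_pattern pr.1 []) 0 0
      if st.2.getD fp 0 < 6 then
        (PySem.List.pySetD st.1 fp (PySem.List.pyGetD st.1 fp "" ++ (" " ++ pr.2)),
         st.2.insert fp (st.2.getD fp 0 + 1))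
      else st)
    (init.2, init.1)
  fin.1

-- ===== PORT B =====
def edit_element_alt (patterns : List String) (fp_samples : List String) (most_similar_pattern : List (List Int)) : List String :=
  -- occ = {pid: [] for pid in range(len(patterns))}
  let occ0 := (PySem.List.pyRange 0 (patterns.length : Int)).foldl
    (fun (d : PySem.Dict Int (List String)) pid => d.insert pid []) PySem.Dict.empty
  -- for sid, sample in enumerate(fp_samples): occ[most_similar_pattern[sid][0]].append(sample)
  let occ := (PySem.List.enumerate fp_samples).foldl
    (fun (d : PySem.Dict Int (List String)) pr =>
      let fp := PySem.List.pyGetD (PySem.List.pyGetD most_similar_pattern pr.1 []) 0 0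
      d.insert fp (d.getD fp [] ++ [pr.2]))
    occ0
  -- [patterns[pid] + '\nWrong samples:' + ''.join(' ' + s for s in occ[pid][:6]) for pid in range(len(patterns))]
  (PySem.List.pyRange 0 (patterns.length : Int)).map (fun pid =>
    PySem.List.pyGetD patterns pid "" ++ "\nWrong samples:" ++
      PySem.Str.join "" ((PySem.List.slice (PySem.Dict.getD occ pid []) none (some 6)).map (fun s => " " ++ s)))

-- ===== PRECONDITION & SPEC =====
-- Pre_ excludes exactly the inputs on which the Python A raises: a sample whose row in
-- most_similar_pattern is missing or empty (IndexError), or whose pattern id is not a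
-- key of count, i.e. not in range(len(patterns)) (KeyError).
def Pre_edit_element (patterns : List String) (fp_samples : List String) (most_similar_pattern : List (List Int)) : Prop :=
  fp_samples.length ≤ most_similar_pattern.length ∧
  ∀ l ∈ most_similar_pattern.take fp_samples.length,
    l ≠ [] ∧ 0 ≤ l.getD 0 0 ∧ l.getD 0 0 < (patterns.length : Int)
instance (patterns : List String) (fp_samples : List String) (most_similar_pattern : List (List Int)) : Decidable (Pre_edit_element patterns fp_samples most_similar_pattern) := by unfold Pre_edit_element; infer_instance
def pvWitness_edit_element : List String × List String × List (List Int) := (["pat A", "pat B"], ["s1", "s2", "s3"], [[1], [0], [1]])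

def Spec_edit_element (patterns : List String) (fp_samples : List String) (most_similar_pattern : List (List Int)) (out : List String) : Prop := out = edit_element_alt patterns fp_samples most_similar_pattern
instance (patterns : List String) (fp_samples : List String) (most_similar_pattern : List (List Int)) (out : List String) : Decidable (Spec_edit_element patterns fp_samples most_similar_pattern out) := by unfold Spec_edit_element; infer_instance

-- ===== CLAIM (what is proved, stated in full; the proofs are below) =====
def Claim_equal_edit_element : Prop := ∀ (patterns : List String) (fp_samples : List String) (most_similar_pattern : List (List Int)), Dom_edit_element patterns fp_samples most_similar_pattern → Pre_edit_element patterns fp_samples most_similar_pattern → Spec_edit_element patterns fp_samples most_similar_pattern (edit_element patterns fp_samples most_similar_pattern)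

-- ===== LEMMAS AND PROOFS =====

-- the routed pattern id of sample index i
def pvFP (msp : List (List Int)) (i : Int) : Int :=
  PySem.List.pyGetD (PySem.List.pyGetD msp i []) 0 0

-- samples of an enumerated suffix routed to pid
def pvSel (msp : List (List Int)) (pid : Int) (l : List (Int × String)) : List String :=
  (l.filter (fun q => pvFP msp q.1 == pid)).map (·.2)

-- A's way of appending samples to a base prompt
def pvRend (base : String) (xs : List String) : String :=
  xs.foldl (fun a s => a ++ (" " ++ s)) base

lemma pvGetSet (xs : List String) (i j : Int) (v d : String)
    (h0 : 0 ≤ i) (h1 : i < (xs.length : Int)) (hj0 : 0 ≤ j) (hj1 : j < (xs.length : Int)) :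
    PySem.List.pyGetD (PySem.List.pySetD xs i v) j d =
      if j = i then v else PySem.List.pyGetD xs j d := by
  rw [PySem.List.pySetD_of_nonneg xs v h0,
      PySem.List.pyGetD_eq_getElem _ d hj0 (by simpa using hj1),
      List.getElem_set]
  by_cases h : j = i
  · subst h; simp
  · rw [if_neg (show ¬ i.toNat = j.toNat by omega), if_neg h,
        PySem.List.pyGetD_eq_getElem _ d hj0 hj1]

-- the first loop: dict part always reads 0, list part appends the suffixed patterns
lemma pvInitList (patterns : List String) (s : Int) (d : PySem.Dict Int Int) (acc : List String) :
    ((PySem.List.enumerate patterns s).foldl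
      (fun (st : PySem.Dict Int Int × List String) pr =>
        (st.1.insert pr.1 0, st.2 ++ [pr.2 ++ "\nWrong samples:"])) (d, acc)).2
    = acc ++ patterns.map (· ++ "\nWrong samples:") := by
  induction patterns generalizing s d acc with
  | nil => simp [PySem.List.enumerate_nil]
  | cons p t ih => simp [PySem.List.enumerate_cons, ih]

lemma pvInitCount (patterns : List String) (s : Int) (d : PySem.Dict Int Int) (acc : List String)
    (hd : ∀ j, d.getD j 0 = 0) (k : Int) :
    ((PySem.List.enumerate patterns s).foldl
      (fun (st : PySem.Dict Int Int × List String) pr =>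
        (st.1.insert pr.1 0, st.2 ++ [pr.2 ++ "\nWrong samples:"])) (d, acc)).1.getD k 0 = 0 := by
  induction patterns generalizing s d acc with
  | nil => simp [PySem.List.enumerate_nil, hd]
  | cons p t ih =>
      rw [PySem.List.enumerate_cons]
      exact ih _ _ _ (fun j => by rw [PySem.Dict.getD_insert]; split <;> simp [hd])

-- main invariant of A's second loop
lemma pvLoop (msp : List (List Int)) (l : List (Int × String)) (ps : List String)
    (cnt : PySem.Dict Int Int)
    (hl : ∀ q ∈ l, 0 ≤ pvFP msp q.1 ∧ pvFP msp q.1 < (ps.length : Int))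
    (hc : ∀ k, 0 ≤ cnt.getD k 0)
    (pid : Int) (hp0 : 0 ≤ pid) (hp1 : pid < (ps.length : Int)) :
    PySem.List.pyGetD
      (l.foldl
        (fun (st : List String × PySem.Dict Int Int) pr =>
          let fp := PySem.List.pyGetD (PySem.List.pyGetD msp pr.1 []) 0 0
          if st.2.getD fp 0 < 6 then
            (PySem.List.pySetD st.1 fp (PySem.List.pyGetD st.1 fp "" ++ (" " ++ pr.2)),
             st.2.insert fp (st.2.getD fp 0 + 1))
          else st)
        (ps, cnt)).1 pid ""
    = pvRend (PySem.List.pyGetD ps pid "")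
        ((pvSel msp pid l).take (6 - cnt.getD pid 0).toNat) := by
  induction l generalizing ps cnt with
  | nil => simp [pvSel, pvRend]
  | cons q t ih =>
      have hq := hl q (by simp)
      obtain ⟨hq0, hq1⟩ := hq
      have hfp : PySem.List.pyGetD (PySem.List.pyGetD msp q.1 []) 0 0 = pvFP msp q.1 := rfl
      simp only [List.foldl_cons]
      by_cases hlt : cnt.getD (pvFP msp q.1) 0 < 6
      · rw [if_pos (by rw [hfp]; exact hlt)]
        have hlen : ((PySem.List.pySetD ps (pvFP msp q.1)
            (PySem.List.pyGetD ps (pvFP msp q.1) "" ++ (" " ++ q.2))).length : Int)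
            = (ps.length : Int) := by rw [PySem.List.length_pySetD]
        rw [hfp]
        rw [ih _ _
          (fun r hr => by rw [hlen]; exact hl r (List.mem_cons_of_mem _ hr))
          (fun k => by rw [PySem.Dict.getD_insert]; split
                       · have := hc (pvFP msp q.1); omega
                       · exact hc k)
          (by rw [hlen]; exact hp1)]
        rw [PySem.Dict.getD_insert]
        by_cases hpe : pid = pvFP msp q.1
        · rw [if_pos hpe]
          rw [pvGetSet _ _ _ _ _ hq0 hq1 hp0 hp1, if_pos hpe]
          have hsel : pvSel msp pid (q :: t) = q.2 :: pvSel msp pid t := by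
            simp [pvSel, hpe]
          rw [hsel, hpe]
          have hcnt := hc (pvFP msp q.1)
          have htake : (6 - cnt.getD (pvFP msp q.1) 0).toNat
              = ((6 - (cnt.getD (pvFP msp q.1) 0 + 1)).toNat) + 1 := by omega
          rw [htake, List.take_succ_cons]
          rfl
        · rw [if_neg hpe]
          rw [pvGetSet _ _ _ _ _ hq0 hq1 hp0 hp1, if_neg hpe]
          have hsel : pvSel msp pid (q :: t) = pvSel msp pid t := by
            simp only [pvSel, List.filter_cons]
            simp only [beq_iff_eq]
            rw [if_neg (fun h => hpe h.symm)]
          rw [hsel]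
      · rw [if_neg (by rw [hfp]; exact hlt)]
        rw [ih _ _ (fun r hr => hl r (List.mem_cons_of_mem _ hr)) hc hp1]
        by_cases hpe : pid = pvFP msp q.1
        · have hz : (6 - cnt.getD pid 0).toNat = 0 := by rw [hpe]; omega
          rw [hz]
          simp [List.take_zero]
        · have hsel : pvSel msp pid (q :: t) = pvSel msp pid t := by
            simp only [pvSel, List.filter_cons]
            simp only [beq_iff_eq]
            rw [if_neg (fun h => hpe h.symm)]
          rw [hsel]

lemma pvJoinCons (p : String) (rest : List String) :
    PySem.Str.join "" (p :: rest) = p ++ PySem.Str.join "" rest := by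
  cases rest with
  | nil => simp [PySem.Str.join, PySem.Chars.join_singleton, PySem.Chars.join_nil]
  | cons q t => simp [PySem.Str.join, PySem.Chars.join_cons_cons]

-- B's join equals A's fold-append rendering
lemma pvJoinRend (xs : List String) (base : String) :
    base ++ PySem.Str.join "" (xs.map (fun s => " " ++ s)) = pvRend base xs := by
  induction xs generalizing base with
  | nil => simp [PySem.Str.join, PySem.Chars.join_nil, pvRend]
  | cons x t ih =>
      show base ++ PySem.Str.join "" ((" " ++ x) :: t.map (fun s => " " ++ s)) = _
      rw [pvJoinCons, ← String.append_assoc]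
      exact ih (base ++ (" " ++ x))

lemma pvLoopLen (msp : List (List Int)) (l : List (Int × String)) (ps : List String)
    (cnt : PySem.Dict Int Int) :
    (l.foldl
      (fun (st : List String × PySem.Dict Int Int) pr =>
        let fp := PySem.List.pyGetD (PySem.List.pyGetD msp pr.1 []) 0 0
        if st.2.getD fp 0 < 6 then
          (PySem.List.pySetD st.1 fp (PySem.List.pyGetD st.1 fp "" ++ (" " ++ pr.2)),
           st.2.insert fp (st.2.getD fp 0 + 1))
        else st)
      (ps, cnt)).1.length = ps.length := by
  induction l generalizing ps cnt with
  | nil => rfl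
  | cons q t ih =>
      simp only [List.foldl_cons]
      split
      · rw [ih, PySem.List.length_pySetD]
      · exact ih _ _

lemma pvInitG (l : List Int) (g : PySem.Dict Int (List String))
    (hg : ∀ j, g.getD j [] = []) (k : Int) :
    (l.foldl (fun (d : PySem.Dict Int (List String)) pid => d.insert pid []) g).getD k [] = [] := by
  induction l generalizing g with
  | nil => exact hg k
  | cons p t ih =>
      exact ih _ (fun j => by rw [PySem.Dict.getD_insert]; split <;> simp [hg])

-- invariant of B's unconditional inverted-index pass
lemma pvLoopG (msp : List (List Int)) (l : List (Int × String)) (g : PySem.Dict Int (List String))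
    (pid : Int) :
    (l.foldl
      (fun (d : PySem.Dict Int (List String)) pr =>
        let fp := PySem.List.pyGetD (PySem.List.pyGetD msp pr.1 []) 0 0
        d.insert fp (d.getD fp [] ++ [pr.2]))
      g).getD pid []
    = g.getD pid [] ++ pvSel msp pid l := by
  induction l generalizing g with
  | nil => simp [pvSel]
  | cons q t ih =>
      simp only [List.foldl_cons]
      have hfp : PySem.List.pyGetD (PySem.List.pyGetD msp q.1 []) 0 0 = pvFP msp q.1 := rfl
      rw [hfp, ih]
      rw [PySem.Dict.getD_insert]
      by_cases hpe : pid = pvFP msp q.1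
      · rw [if_pos hpe, hpe]
        have hsel : pvSel msp (pvFP msp q.1) (q :: t) = q.2 :: pvSel msp (pvFP msp q.1) t := by
          simp [pvSel]
        rw [hsel, List.append_assoc, List.singleton_append]
      · rw [if_neg hpe]
        have hsel : pvSel msp pid (q :: t) = pvSel msp pid t := by
          simp only [pvSel, List.filter_cons, beq_iff_eq]
          rw [if_neg (fun h => hpe h.symm)]
        rw [hsel]

-- ===== VERDICT (by name: the statement is the Claim_ definition above) =====
theorem edit_element_spec : Claim_equal_edit_element := by
  intro patterns fp_samples msp _hdom hpre
  obtain ⟨hlen, hrow⟩ := hpre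
  unfold Spec_edit_element
  simp only [edit_element, edit_element_alt]
  rw [pvInitList]
  have hcnt0 : ∀ k : Int,
      ((PySem.List.enumerate patterns).foldl
        (fun (st : PySem.Dict Int Int × List String) pr =>
          (st.1.insert pr.1 0, st.2 ++ [pr.2 ++ "\nWrong samples:"]))
        (PySem.Dict.empty, [])).1.getD k 0 = 0 :=
    fun k => pvInitCount patterns 0 _ _ (fun j => PySem.Dict.getD_empty j 0) k
  have hall : ∀ q ∈ PySem.List.enumerate fp_samples 0,
      0 ≤ pvFP msp q.1 ∧ pvFP msp q.1 < (([] ++ patterns.map (· ++ "\nWrong samples:")).length : Int) := by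
    intro q hq
    rw [PySem.List.mem_enumerate_iff] at hq
    obtain ⟨k, hk, rfl⟩ := hq
    have hkm : k < msp.length := by omega
    have hmem : msp[k] ∈ msp.take fp_samples.length := by
      rw [← List.getElem_take (h := by simp only [List.length_take, lt_min_iff]; exact ⟨hk, hkm⟩)]
      exact List.getElem_mem _
    obtain ⟨-, h0, h1⟩ := hrow _ hmem
    have hget : pvFP msp ((0 : Int) + (k : Int)) = msp[k].getD 0 0 := by
      show PySem.List.pyGetD (PySem.List.pyGetD msp ((0:Int) + (k:Int)) []) 0 0 = _
      rw [zero_add, PySem.List.pyGetD_natCast, PySem.List.pyGetD_zero,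
          List.getD_eq_getElem _ _ hkm]
    simp only [List.nil_append, List.length_map]
    exact ⟨by rw [hget]; exact h0, by rw [hget]; exact h1⟩
  apply List.ext_getElem
  · rw [pvLoopLen]
    simp [PySem.List.pyRange_zero_natCast]
  · intro k hk1 hk2
    have hkp : k < patterns.length := by
      simpa [PySem.List.pyRange_zero_natCast] using hk2
    have hA := pvLoop msp (PySem.List.enumerate fp_samples)
        ([] ++ patterns.map (· ++ "\nWrong samples:"))
        ((List.foldl (fun (st : PySem.Dict Int Int × List String) pr =>
            (st.1.insert pr.1 0, st.2 ++ [pr.2 ++ "\nWrong samples:"]))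
          (PySem.Dict.empty, []) (PySem.List.enumerate patterns)).1)
        hall (fun j => by rw [hcnt0]) (k : Int) (by positivity)
        (by simp only [List.nil_append, List.length_map]; exact_mod_cast hkp)
    rw [hcnt0] at hA
    have hbase : PySem.List.pyGetD ([] ++ patterns.map (· ++ "\nWrong samples:")) (k : Int) ""
        = patterns[k] ++ "\nWrong samples:" := by
      rw [PySem.List.pyGetD_natCast, List.getD_eq_getElem _ _ (by simpa using hkp)]
      simp
    rw [PySem.List.pyGetD_natCast,
        List.getD_eq_getElem _ _ (by rw [pvLoopLen]; simpa using hkp), hbase] at hA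
    rw [hA]
    -- B's k-th element
    have hg0 : ∀ k : Int,
        (((PySem.List.pyRange 0 (patterns.length : Int)).foldl
          (fun (d : PySem.Dict Int (List String)) pid => d.insert pid [])
          PySem.Dict.empty)).getD k [] = ([] : List String) :=
      pvInitG _ _ (fun j => PySem.Dict.getD_empty j [])
    have hG := pvLoopG msp (PySem.List.enumerate fp_samples)
        ((PySem.List.pyRange 0 (patterns.length : Int)).foldl
          (fun (d : PySem.Dict Int (List String)) pid => d.insert pid []) PySem.Dict.empty)
        (k : Int)
    rw [hg0, List.nil_append] at hG
    have hBk : (List.map (fun pid =>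
        PySem.List.pyGetD patterns pid "" ++ "\nWrong samples:" ++
          PySem.Str.join ""
            ((PySem.List.slice (PySem.Dict.getD ((PySem.List.enumerate fp_samples).foldl
              (fun (d : PySem.Dict Int (List String)) pr =>
                let fp := PySem.List.pyGetD (PySem.List.pyGetD msp pr.1 []) 0 0
                d.insert fp (d.getD fp [] ++ [pr.2]))
              ((PySem.List.pyRange 0 (patterns.length : Int)).foldl
                (fun (d : PySem.Dict Int (List String)) pid => d.insert pid [])
                PySem.Dict.empty)) pid []) none (some 6)).map (fun s => " " ++ s)))
        (PySem.List.pyRange 0 (patterns.length : Int)))[k]'hk2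
      = PySem.List.pyGetD patterns (k : Int) "" ++ "\nWrong samples:" ++
          PySem.Str.join ""
            ((PySem.List.slice (PySem.Dict.getD ((PySem.List.enumerate fp_samples).foldl
              (fun (d : PySem.Dict Int (List String)) pr =>
                let fp := PySem.List.pyGetD (PySem.List.pyGetD msp pr.1 []) 0 0
                d.insert fp (d.getD fp [] ++ [pr.2]))
              ((PySem.List.pyRange 0 (patterns.length : Int)).foldl
                (fun (d : PySem.Dict Int (List String)) pid => d.insert pid [])
                PySem.Dict.empty)) (k : Int) []) none (some 6)).map (fun s => " " ++ s)) := by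
      simp [PySem.List.pyRange_zero_natCast]
    have hbase2 : PySem.List.pyGetD patterns (k : Int) "" = patterns[k] := by
      rw [PySem.List.pyGetD_natCast, List.getD_eq_getElem _ _ hkp]
    rw [hBk, hG, hbase2, PySem.List.slice_to _ (by norm_num), pvJoinRend]
    rfl
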